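-- pv_equiv track=rewrite | github.com/Maxime-brs/OCP-Feedback-Gains | test_flops.py | computeFlops
-- ===== SOURCE A (Python) =====
-- def computeFlops(N, n, m):
--     flops = 0
--     for i in range(0,N-1): # N-1 iters
-- #        flops += (1./3)*m**3
--         for j in range(i, N): # N-i iters
--             for k in range(i+1, j+2): # j+1-i iters
--                 if(k<=j):
--                     flops += m**3
--                     flops += m**3
--                 if(j<N-1):
--                     flops += n*m*m
--                     flops += m*m*n
--     return flops
-- ===== SOURCE B (Python) =====
-- def computeFlops(N, n, m):
--     # Closed form: each (i, j) pair contributes 2*m**3 per k with k <= j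
--     # and 2*n*m*m per k when j < N-1; both tallies sum to the same
--     # triangular-number series, giving (m**3 + n*m*m) * (N-1)*N*(N+1)/3.
--     if N < 2:
--         return 0
--     return (m**3 + n * m * m) * ((N - 1) * N * (N + 1) // 3)
-- ===== Notes on version B (the rewrite author's own statement) =====
-- stated objective: faster
-- what changed: Replaced the O(N^3) triple nested loop of constant increments by a closed-form polynomial: counting the qualifying (i,j,k) triples gives flops = (m**3 + n*m*m) * (N-1)*N*(N+1)/3.
import Mathlib
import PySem

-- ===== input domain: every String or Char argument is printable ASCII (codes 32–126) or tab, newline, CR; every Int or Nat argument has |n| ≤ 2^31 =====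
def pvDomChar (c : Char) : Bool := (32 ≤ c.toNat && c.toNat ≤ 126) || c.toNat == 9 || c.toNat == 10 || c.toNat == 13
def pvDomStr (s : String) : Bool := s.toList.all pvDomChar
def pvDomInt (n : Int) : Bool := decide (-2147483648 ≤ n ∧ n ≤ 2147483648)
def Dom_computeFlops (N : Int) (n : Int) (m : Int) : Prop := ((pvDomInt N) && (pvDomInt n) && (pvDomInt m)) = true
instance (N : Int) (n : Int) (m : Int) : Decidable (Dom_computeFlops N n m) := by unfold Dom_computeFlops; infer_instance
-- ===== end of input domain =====

-- B replaces A's O(N^3) triple loop of constant increments by a closed-form polynomial (objective: faster, asymptotic).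


-- ===== PORT A =====
def computeFlops (N : Int) (n : Int) (m : Int) : Int :=
  (PySem.List.pyRange 0 (N - 1) 1).foldl (fun flops i =>
    (PySem.List.pyRange i N 1).foldl (fun flops j =>
      (PySem.List.pyRange (i + 1) (j + 2) 1).foldl (fun flops k =>
        let flops := if k ≤ j then flops + m ^ 3 + m ^ 3 else flops
        if j < N - 1 then flops + n * m * m + m * m * n else flops) flops) flops) 0

-- ===== PORT B =====
def computeFlops_alt (N : Int) (n : Int) (m : Int) : Int :=
  if N < 2 then 0
  else (m ^ 3 + n * m * m) * PySem.Int.floordiv ((N - 1) * N * (N + 1)) 3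

-- ===== PRECONDITION & SPEC =====
def Spec_computeFlops (N : Int) (n : Int) (m : Int) (out : Int) : Prop := out = computeFlops_alt N n m
instance (N : Int) (n : Int) (m : Int) (out : Int) : Decidable (Spec_computeFlops N n m out) := by unfold Spec_computeFlops; infer_instance

-- ===== CLAIM (what is proved, stated in full; the proofs are below) =====
def Claim_equal_computeFlops : Prop := ∀ (N : Int) (n : Int) (m : Int), Dom_computeFlops N n m → Spec_computeFlops N n m (computeFlops N n m)

-- ===== LEMMAS AND PROOFS =====

-- ((List.range K).map f).sum as a Finset sum
theorem pvListSumRange (f : Nat → Int) (K : Nat) :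
    ((List.range K).map f).sum = ∑ t ∈ Finset.range K, f t := by
  induction K with
  | zero => simp
  | succ K ih => simp [List.range_succ, Finset.sum_range_succ, ih]

-- Gauss sum over Int
theorem pvGauss (K : Nat) : 2 * (∑ t ∈ Finset.range K, (t : Int)) = (K : Int) * ((K : Int) - 1) := by
  induction K with
  | zero => simp
  | succ K ih => rw [Finset.sum_range_succ]; push_cast; linear_combination ih

-- sum of (t+1)(t+2)
theorem pvCube (K : Nat) :
    3 * (∑ t ∈ Finset.range K, ((t : Int) + 1) * ((t : Int) + 2)) = (K : Int) * ((K : Int) + 1) * ((K : Int) + 2) := by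
  induction K with
  | zero => simp
  | succ K ih => rw [Finset.sum_range_succ]; push_cast; linear_combination ih

-- innermost k-loop in closed form
theorem pvInner (N n m i j f : Int) (hij : i ≤ j) :
    (PySem.List.pyRange (i + 1) (j + 2) 1).foldl (fun flops k =>
        let flops := if k ≤ j then flops + m ^ 3 + m ^ 3 else flops
        if j < N - 1 then flops + n * m * m + m * m * n else flops) f
    = f + ((j - i) * (2 * m ^ 3) + (if j < N - 1 then (j - i + 1) * (2 * (n * m * m)) else 0)) := by
  have hfun : (fun (flops k : Int) =>
        let flops := if k ≤ j then flops + m ^ 3 + m ^ 3 else flops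
        if j < N - 1 then flops + n * m * m + m * m * n else flops)
      = (fun (acc k : Int) => acc + ((if k ≤ j then 2 * m ^ 3 else 0) +
          (if j < N - 1 then n * m * m + m * m * n else 0))) := by
    funext acc k; dsimp only; split_ifs <;> ring
  rw [hfun, PySem.List.foldl_add, PySem.List.pyRange_one, List.map_map, pvListSumRange]
  simp only [Function.comp_apply]
  have hM : (j + 2 - (i + 1)).toNat = (j - i).toNat + 1 := by omega
  rw [hM, Finset.sum_range_succ]
  rw [if_neg (show ¬ (i + 1 + (((j - i).toNat : Nat) : Int) ≤ j) by omega)]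
  have hsc : ∑ t ∈ Finset.range (j - i).toNat,
      ((if i + 1 + (t : Int) ≤ j then 2 * m ^ 3 else 0) +
       (if j < N - 1 then n * m * m + m * m * n else 0))
      = ∑ t ∈ Finset.range (j - i).toNat,
      (2 * m ^ 3 + (if j < N - 1 then n * m * m + m * m * n else 0)) := by
    apply Finset.sum_congr rfl
    intro t ht
    have := Finset.mem_range.mp ht
    rw [if_pos (by omega)]
  rw [hsc, Finset.sum_const, Finset.card_range, nsmul_eq_mul]
  have hc : (((j - i).toNat : Nat) : Int) = j - i := by omega
  rw [hc]
  split_ifs <;> ring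

-- middle j-loop in closed form
theorem pvMiddle (N n m i f : Int) (_hi0 : 0 ≤ i) (hiN : i ≤ N - 1) :
    (PySem.List.pyRange i N 1).foldl (fun flops j =>
      (PySem.List.pyRange (i + 1) (j + 2) 1).foldl (fun flops k =>
        let flops := if k ≤ j then flops + m ^ 3 + m ^ 3 else flops
        if j < N - 1 then flops + n * m * m + m * m * n else flops) flops) f
    = f + ((m ^ 3 + n * m * m) * ((N - 1 - i) * (N - i))) := by
  rw [PySem.List.foldl_congr_mem (PySem.List.pyRange i N 1)
    (fun (flops j : Int) =>
      (PySem.List.pyRange (i + 1) (j + 2) 1).foldl (fun flops k =>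
        let flops := if k ≤ j then flops + m ^ 3 + m ^ 3 else flops
        if j < N - 1 then flops + n * m * m + m * m * n else flops) flops)
    (fun (acc j : Int) => acc + ((j - i) * (2 * m ^ 3) +
      (if j < N - 1 then (j - i + 1) * (2 * (n * m * m)) else 0)))
    f
    (fun acc j hj => pvInner N n m i j acc (PySem.List.mem_pyRange_one.mp hj).1)]
  rw [PySem.List.foldl_add, PySem.List.pyRange_one, List.map_map, pvListSumRange]
  simp only [Function.comp_apply]
  have hM : (N - i).toNat = (N - 1 - i).toNat + 1 := by omega
  rw [hM, Finset.sum_range_succ]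
  rw [if_neg (show ¬ (i + (((N - 1 - i).toNat : Nat) : Int) < N - 1) by omega)]
  have hsc : ∑ t ∈ Finset.range (N - 1 - i).toNat,
      ((i + (t : Int) - i) * (2 * m ^ 3) +
       (if i + (t : Int) < N - 1 then (i + (t : Int) - i + 1) * (2 * (n * m * m)) else 0))
      = ∑ t ∈ Finset.range (N - 1 - i).toNat,
      ((t : Int) * (2 * m ^ 3) + ((t : Int) + 1) * (2 * (n * m * m))) := by
    apply Finset.sum_congr rfl
    intro t ht
    have := Finset.mem_range.mp ht
    rw [if_pos (by omega)]
    ring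
  rw [hsc]
  have hdist : ∑ t ∈ Finset.range (N - 1 - i).toNat,
      ((t : Int) * (2 * m ^ 3) + ((t : Int) + 1) * (2 * (n * m * m)))
      = (2 * m ^ 3 + 2 * (n * m * m)) * (∑ t ∈ Finset.range (N - 1 - i).toNat, (t : Int))
        + (((N - 1 - i).toNat : Int)) * (2 * (n * m * m)) := by
    rw [Finset.sum_add_distrib]
    rw [show (∑ t ∈ Finset.range (N - 1 - i).toNat, ((t : Int) + 1) * (2 * (n * m * m)))
        = ∑ t ∈ Finset.range (N - 1 - i).toNat, ((t : Int) * (2 * (n * m * m)) + 2 * (n * m * m)) from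
      Finset.sum_congr rfl (fun t _ => by ring)]
    rw [Finset.sum_add_distrib, Finset.sum_const, Finset.card_range, nsmul_eq_mul,
      ← Finset.sum_mul, ← Finset.sum_mul]
    ring
  rw [hdist]
  have hg := pvGauss (N - 1 - i).toNat
  have hKZ : (((N - 1 - i).toNat : Nat) : Int) = N - 1 - i := by omega
  rw [hKZ] at hg ⊢
  have hN : N - i = (N - 1 - i) + 1 := by ring
  linear_combination (m ^ 3 + n * m * m) * hg

theorem pvMain (N n m : Int) : computeFlops N n m = computeFlops_alt N n m := by
  unfold computeFlops computeFlops_alt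
  by_cases hN : N < 2
  · rw [if_pos hN, PySem.List.pyRange_one_eq_nil (by omega)]
    rfl
  · rw [if_neg hN]
    rw [PySem.List.foldl_congr_mem (PySem.List.pyRange 0 (N - 1) 1)
      (fun (flops i : Int) =>
        (PySem.List.pyRange i N 1).foldl (fun flops j =>
          (PySem.List.pyRange (i + 1) (j + 2) 1).foldl (fun flops k =>
            let flops := if k ≤ j then flops + m ^ 3 + m ^ 3 else flops
            if j < N - 1 then flops + n * m * m + m * m * n else flops) flops) flops)
      (fun (acc i : Int) => acc + ((m ^ 3 + n * m * m) * ((N - 1 - i) * (N - i))))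
      0
      (fun acc i hi => pvMiddle N n m i acc (PySem.List.mem_pyRange_one.mp hi).1
        (le_of_lt (PySem.List.mem_pyRange_one.mp hi).2))]
    rw [PySem.List.foldl_add, PySem.List.pyRange_one, List.map_map, pvListSumRange]
    simp only [Function.comp_apply]
    have hrefl : ∑ t ∈ Finset.range (N - 1 - 0).toNat,
        ((m ^ 3 + n * m * m) * ((N - 1 - (0 + (t : Int))) * (N - (0 + (t : Int)))))
        = ∑ t ∈ Finset.range (N - 1 - 0).toNat,
        ((m ^ 3 + n * m * m) * (((t : Int) + 1) * ((t : Int) + 2))) := by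
      rw [← Finset.sum_range_reflect (fun t =>
        ((m ^ 3 + n * m * m) * (((t : Int) + 1) * ((t : Int) + 2)))) ((N - 1 - 0).toNat)]
      apply Finset.sum_congr rfl
      intro t ht
      have ht' := Finset.mem_range.mp ht
      have hcast : (((N - 1 - 0).toNat - 1 - t : Nat) : Int) = (N - 1) - 1 - t := by omega
      rw [hcast]
      ring
    rw [hrefl]
    have hc := pvCube (N - 1 - 0).toNat
    have hKZ : (((N - 1 - 0).toNat : Nat) : Int) = N - 1 := by omega
    rw [hKZ] at hc
    have hdiv : PySem.Int.floordiv ((N - 1) * N * (N + 1)) 3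
        = ∑ t ∈ Finset.range (N - 1 - 0).toNat, (((t : Int) + 1) * ((t : Int) + 2)) := by
      have h3 : (N - 1) * N * (N + 1)
          = 3 * ∑ t ∈ Finset.range (N - 1 - 0).toNat, (((t : Int) + 1) * ((t : Int) + 2)) := by
        rw [hc]; ring
      rw [h3, PySem.Int.floordiv_eq_ediv_of_pos (by norm_num)]
      exact Int.mul_ediv_cancel_left _ (by norm_num)
    rw [hdiv, Finset.mul_sum, zero_add]

-- ===== VERDICT (by name: the statement is the Claim_ definition above) =====
theorem computeFlops_spec : Claim_equal_computeFlops := by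
  intro N n m _
  exact pvMain N n m
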